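-- pv_equiv track=rewrite | github.com/yukou-isshiki/study_python_algorithm | 2_2/answer2.py | gengo
-- ===== SOURCE A (Python) =====
-- def gengo(year):
--     gengo_start_dict = {"明治":1868, "大正":1912, "昭和":1926, "平成":1989, "令和":2019}
--     base_year = next(iter(gengo_start_dict.values()))
--     gengo_name = ""
--     if year < base_year:
--         return "江戸時代以前には対応していません"
--     for next_gengo_name in gengo_start_dict:
--         if year < gengo_start_dict[next_gengo_name]:
--             year_count = year_count_calc(year, base_year)
--             return f"{gengo_name}{year_count}年"
--         else:
--             base_year = gengo_start_dict[next_gengo_name]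
--             gengo_name = next_gengo_name
--         if gengo_name == list(gengo_start_dict.items())[-1][0]:
--             year_count = year_count_calc(year, gengo_start_dict[gengo_name])
--             return f"{gengo_name}{year_count}年"
--
-- def year_count_calc(end, start):
--     year_count = end - start + 1
--     if year_count == 1:
--         year_count = "元"
--     return year_count
-- ===== SOURCE B (Python) =====
-- def gengo(year):
--     starts = [1868, 1912, 1926, 1989, 2019]
--     names = ["明治", "大正", "昭和", "平成", "令和"]
--     if year < starts[0]:
--         return "江戸時代以前には対応していません"
--     # binary search for the rightmost era start <= year (bisect_right - 1)
--     lo, hi = 0, len(starts)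
--     while lo < hi:
--         mid = (lo + hi) // 2
--         if starts[mid] <= year:
--             lo = mid + 1
--         else:
--             hi = mid
--     i = lo - 1
--     yc = year - starts[i] + 1
--     return f"{names[i]}{'元' if yc == 1 else yc}年"
-- ===== Notes on version B (the rewrite author's own statement) =====
-- stated objective: simpler
-- what changed: Replaces the stateful forward scan over a dict (with its mutating base_year/gengo_name bookkeeping and last-key check) by a parallel start/name table plus a hand-written bisect_right binary search locating the era.
import Mathlib
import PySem

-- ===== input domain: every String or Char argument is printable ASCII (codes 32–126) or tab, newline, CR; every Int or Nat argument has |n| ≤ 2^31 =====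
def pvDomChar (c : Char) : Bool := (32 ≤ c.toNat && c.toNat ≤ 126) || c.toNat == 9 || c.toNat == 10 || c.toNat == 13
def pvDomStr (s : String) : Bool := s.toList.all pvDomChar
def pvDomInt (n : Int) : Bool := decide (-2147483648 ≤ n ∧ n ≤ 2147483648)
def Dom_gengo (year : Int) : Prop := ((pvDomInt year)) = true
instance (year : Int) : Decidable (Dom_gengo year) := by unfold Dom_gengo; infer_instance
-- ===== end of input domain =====

-- B replaces A's stateful forward scan over a dict by parallel start/name tables and a binary search (simpler).


-- ===== PORT A =====
-- year_count_calc, fused with the f-string rendering at the call sites (int is rendered via str)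
def yearCountCalc (e s : Int) : String :=
  let yc := e - s + 1
  if yc = 1 then "元" else PySem.Int.toStr yc

-- the for-loop over the dict's (key, start) pairs, state = (base_year, gengo_name)
def gengoLoop (year : Int) : List (String × Int) → Int → String → String
  | [], _, _ => ""   -- unreachable in A (the last-key check always returns first); Python would return None
  | (name, start) :: rest, base, gn =>
    if year < start then
      gn ++ yearCountCalc year base ++ "年"
    else if name = "令和" then   -- list(gengo_start_dict.items())[-1][0]
      name ++ yearCountCalc year start ++ "年"
    else
      gengoLoop year rest start name

def gengo (year : Int) : String :=
  let d : List (String × Int) := [("明治", 1868), ("大正", 1912), ("昭和", 1926), ("平成", 1989), ("令和", 2019)]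
  let base : Int := 1868   -- next(iter(dict.values()))
  if year < base then "江戸時代以前には対応していません"
  else gengoLoop year d base ""

-- ===== PORT B =====
-- the while lo < hi binary-search loop; fuel bounds the iteration count (hi - lo shrinks each step)
def bsLoop (starts : List Int) (year : Int) : Nat → Int → Int → Int
  | 0, lo, _ => lo
  | fuel + 1, lo, hi =>
    if lo < hi then
      let mid := PySem.Int.floordiv (lo + hi) 2
      match PySem.List.pyGet? starts mid with
      | some v => if v ≤ year then bsLoop starts year fuel (mid + 1) hi
                  else bsLoop starts year fuel lo mid
      | none => lo
    else lo

def gengo_alt (year : Int) : String :=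
  let starts : List Int := [1868, 1912, 1926, 1989, 2019]
  let names : List String := ["明治", "大正", "昭和", "平成", "令和"]
  if year < 1868 then "江戸時代以前には対応していません"
  else
    let lo := bsLoop starts year 5 0 5
    let i := lo - 1
    match PySem.List.pyGet? names i, PySem.List.pyGet? starts i with
    | some nm, some st =>
      let yc := year - st + 1
      nm ++ (if yc = 1 then "元" else PySem.Int.toStr yc) ++ "年"
    | _, _ => ""

-- ===== PRECONDITION & SPEC =====
def Spec_gengo (year : Int) (out : String) : Prop := out = gengo_alt year
instance (year : Int) (out : String) : Decidable (Spec_gengo year out) := by unfold Spec_gengo; infer_instance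

-- ===== CLAIM (what is proved, stated in full; the proofs are below) =====
def Claim_equal_gengo : Prop := ∀ (year : Int), Dom_gengo year → Spec_gengo year (gengo year)

-- ===== LEMMAS AND PROOFS =====

-- ===== VERDICT (by name: the statement is the Claim_ definition above) =====
theorem gengo_spec : Claim_equal_gengo := by
  intro y _
  unfold Spec_gengo gengo gengo_alt
  by_cases h1 : y < 1868
  · simp [h1]
  by_cases h2 : y < 1912
  · have n3 : ¬ (1926 ≤ y) := by omega
    have n2 : ¬ (1912 ≤ y) := by omega
    have p1 : (1868 : Int) ≤ y := by omega
    simp [h1, h2, n3, n2, p1, gengoLoop, bsLoop, yearCountCalc,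
      PySem.List.pyGet?, PySem.List.pyIdx?, PySem.Int.floordiv]
  by_cases h3 : y < 1926
  · simp [h1, h2, h3, (show (1912:Int) ≤ y by omega), (show ¬(1926 ≤ y) by omega),
      gengoLoop, bsLoop, yearCountCalc, PySem.List.pyGet?, PySem.List.pyIdx?, PySem.Int.floordiv]
  by_cases h4 : y < 1989
  · simp [h1, h2, h3, h4, (show (1926:Int) ≤ y by omega), (show ¬(1989 ≤ y) by omega),
      (show ¬(2019 ≤ y) by omega),
      gengoLoop, bsLoop, yearCountCalc, PySem.List.pyGet?, PySem.List.pyIdx?, PySem.Int.floordiv]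
  by_cases h5 : y < 2019
  · simp [h1, h2, h3, h4, h5, (show (1926:Int) ≤ y by omega), (show (1989:Int) ≤ y by omega),
      (show ¬(2019 ≤ y) by omega),
      gengoLoop, bsLoop, yearCountCalc, PySem.List.pyGet?, PySem.List.pyIdx?, PySem.Int.floordiv]
  · simp [h1, h2, h3, h4, h5, (show (1926:Int) ≤ y by omega), (show (2019:Int) ≤ y by omega),
      gengoLoop, bsLoop, yearCountCalc, PySem.List.pyGet?, PySem.List.pyIdx?, PySem.Int.floordiv]
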